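-- pv_equiv track=rewrite | github.com/hcedenoindri/Python-Programs | eggs_py/eggs.py | is_superegg_iterative
-- ===== SOURCE A (Python) =====
-- def is_egg(s):
--     """ Recieves a string s and returns True
--         if s is an egg. """
--     if len(s) != 3:
--         return False
--     if s[-2] == s[-1]:
--         return True
--     return False
--
-- def is_superegg_iterative(s):
--     """ Recieves a string s and returns True
--         if s is a superegg. Applies iteration. """
--     if len(s) < 3 or len(s)%2 == 0:
--         return False
--     if s[-2] != s[-1]:
--         return False
--     if is_egg(s):
--         return True
--
--     A = s[0:-2]
--     flag = True
--     while( flag):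
--         if len(A) < 3:
--             return False
--         if A[-2] != A[-1]:
--             return False
--         if len(A) == 3:
--             flag = False
--         A = A[0:-2]
--     return True
-- ===== SOURCE B (Python) =====
-- def is_superegg_iterative(s):
--     """ Recieves a string s and returns True
--         if s is a superegg. Single forward index scan,
--         no per-iteration slice copies. """
--     if len(s) < 3 or len(s) % 2 == 0:
--         return False
--     i = 1
--     while i < len(s) - 1:
--         if s[i] != s[i + 1]:
--             return False
--         i += 2
--     return True
-- ===== Notes on version B (the rewrite author's own statement) =====
-- stated objective: faster
-- what changed: A repeatedly peels the last two characters with s[0:-2] slice copies in a flag-driven while loop (plus an is_egg special case); B does one forward index scan comparing s[i] to s[i+1] for odd i, with no copying and no special cases.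
import Mathlib
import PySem

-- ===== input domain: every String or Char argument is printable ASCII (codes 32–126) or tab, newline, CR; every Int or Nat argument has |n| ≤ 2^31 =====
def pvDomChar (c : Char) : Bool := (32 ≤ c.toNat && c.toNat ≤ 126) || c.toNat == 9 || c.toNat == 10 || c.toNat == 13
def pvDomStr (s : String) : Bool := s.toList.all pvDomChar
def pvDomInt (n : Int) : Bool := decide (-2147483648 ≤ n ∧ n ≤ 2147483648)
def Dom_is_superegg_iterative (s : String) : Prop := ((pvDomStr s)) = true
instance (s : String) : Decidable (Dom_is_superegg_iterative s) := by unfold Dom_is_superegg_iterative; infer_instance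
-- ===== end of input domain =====

-- B replaces A's flag-driven loop that repeatedly copies s[0:-2] by a single
-- forward index scan comparing s[i] with s[i+1] for odd i (faster, no slice copies).

-- ===== PORT A =====

-- termination helper for pvLoopA's `A = A[0:-2]` step (cited by decreasing_by)
theorem pvSliceTake (l : List Char) :
    PySem.List.slice l (some 0) (some (-2)) = l.take (l.length - 2) := by
  rw [PySem.List.slice_zero_start, PySem.List.slice_to_neg_ofNat l 2 (by omega)]

def pvLoopA (A : List Char) : Bool :=
  -- `while flag:` of Python A, transcribed as recursion on A
  if A.length < 3 then false                                               -- if len(A) < 3: return False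
  else if PySem.List.pyGet? A (-2) != PySem.List.pyGet? A (-1) then false  -- if A[-2] != A[-1]: return False
  else if A.length == 3 then true                 -- flag = False; A = A[0:-2]; loop exits; return True
  else pvLoopA (PySem.List.slice A (some 0) (some (-2)))                   -- A = A[0:-2]
termination_by A.length
decreasing_by rw [pvSliceTake]; simp; omega

def pvIsEgg (s : String) : Bool :=
  if PySem.Str.len s != 3 then false
  else if PySem.Str.pyGet? s (-2) == PySem.Str.pyGet? s (-1) then true
  else false

def is_superegg_iterative (s : String) : Bool :=
  if PySem.Str.len s < 3 || PySem.Int.mod (PySem.Str.len s) 2 == 0 then false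
  else if PySem.Str.pyGet? s (-2) != PySem.Str.pyGet? s (-1) then false
  else if pvIsEgg s then true
  else pvLoopA (PySem.List.slice s.toList (some 0) (some (-2)))            -- A = s[0:-2], then the loop

-- ===== PORT B =====

def pvLoopB (s : String) (i : Int) : Bool :=
  -- `while i < len(s) - 1:` of Source B
  if i < PySem.Str.len s - 1 then
    if PySem.Str.pyGet? s i != PySem.Str.pyGet? s (i + 1) then false       -- if s[i] != s[i+1]: return False
    else pvLoopB s (i + 2)                                                 -- i += 2
  else true
termination_by (PySem.Str.len s - i).toNat
decreasing_by simp [PySem.Str.len] at *; omega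

def is_superegg_iterative_alt (s : String) : Bool :=
  if PySem.Str.len s < 3 || PySem.Int.mod (PySem.Str.len s) 2 == 0 then false
  else pvLoopB s 1

-- ===== PRECONDITION & SPEC =====
def Spec_is_superegg_iterative (s : String) (out : Bool) : Prop := out = is_superegg_iterative_alt s
instance (s : String) (out : Bool) : Decidable (Spec_is_superegg_iterative s out) := by unfold Spec_is_superegg_iterative; infer_instance

-- ===== CLAIM (what is proved, stated in full; the proofs are below) =====
def Claim_equal_is_superegg_iterative : Prop := ∀ (s : String), Dom_is_superegg_iterative s → Spec_is_superegg_iterative s (is_superegg_iterative s)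

-- ===== LEMMAS AND PROOFS =====

-- proof-only spec of the pair condition: adjacent pairs all equal
def pvPairs : List Char → Bool
  | a :: b :: r => if a != b then false else pvPairs r
  | _ => true

theorem pvPairs_short (t : List Char) (h : t.length ≤ 1) : pvPairs t = true := by
  match t, h with
  | [], _ => rfl
  | [a], _ => rfl

theorem pvPairs_pair (x y : Char) : pvPairs [x, y] = (x == y) := by
  by_cases hxy : x = y <;> simp [pvPairs, hxy]

theorem pvPairs_append (t : List Char) :
    t.length % 2 = 0 → ∀ x y : Char, pvPairs (t ++ [x, y]) = (pvPairs t && (x == y)) := by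
  induction t using pvPairs.induct with
  | case1 a b r hab =>
      intro _ x y
      simp [pvPairs, hab]
  | case2 a b r hab ih =>
      intro h x y
      simp only [List.cons_append, pvPairs, if_neg hab]
      exact ih (by simp at h; omega) x y
  | case3 t hne =>
      intro h x y
      match t, hne with
      | [], _ => simpa using pvPairs_pair x y
      | [a], _ => simp at h
      | a :: b :: r, hne => exact absurd rfl (hne a b r)

theorem pvSplitLast2 (l : List Char) (h : 2 ≤ l.length) : ∃ t x y, l = t ++ [x, y] := by
  match hr : l.reverse with
  | [] => rw [← l.reverse_reverse, hr] at h; simp at h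
  | [y] => rw [← l.reverse_reverse, hr] at h; simp at h
  | y :: x :: r =>
      refine ⟨r.reverse, x, y, ?_⟩
      rw [← l.reverse_reverse, hr]
      simp

theorem pvGet?_nat (l : List Char) (i : Nat) (h : i < l.length) :
    PySem.List.pyGet? l (i : Int) = some l[i] := by
  simp [h]

theorem pvGet?_neg (l : List Char) (k : Nat) (hk : 0 < k) (h : k ≤ l.length) :
    PySem.List.pyGet? l (-(k : Int)) = l[l.length - k]? := by
  simp [PySem.List.pyGet?, PySem.List.pyIdx?]
  rw [if_neg (by omega), if_pos h]
  rfl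

theorem pvGet?_last2 (t : List Char) (x y : Char) :
    PySem.List.pyGet? (t ++ [x, y]) (-2) = some x := by
  have h := pvGet?_neg (t ++ [x, y]) 2 (by omega) (by simp)
  norm_num at h
  exact h

theorem pvGet?_last1 (t : List Char) (x y : Char) :
    PySem.List.pyGet? (t ++ [x, y]) (-1) = some y := by
  have h := pvGet?_neg (t ++ [x, y]) 1 (by omega) (by simp)
  norm_num at h
  exact h

theorem pvTakeLeft2 (t : List Char) (x y : Char) :
    (t ++ [x, y]).take ((t ++ [x, y]).length - 2) = t := by
  simp

theorem pvLoopA_eq (l : List Char) (hodd : l.length % 2 = 1) (h3 : 3 ≤ l.length) :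
    pvLoopA l = pvPairs l.tail := by
  generalize hm : l.length = m
  induction m using Nat.strong_induction_on generalizing l with
  | _ m ih =>
    obtain ⟨t, x, y, rfl⟩ := pvSplitLast2 l (by omega)
    have hlen : (t ++ [x, y]).length = t.length + 2 := by simp
    rw [hlen] at hodd h3 hm
    have ht1 : 1 ≤ t.length := by omega
    have htne : t ≠ [] := by intro h; subst h; simp at ht1
    have htail : (t ++ [x, y]).tail = t.tail ++ [x, y] := List.tail_append_of_ne_nil htne
    have htlen : t.tail.length % 2 = 0 := by
      simp only [List.length_tail]
      omega
    rw [pvLoopA, if_neg (by simp only [hlen]; omega), pvGet?_last2, pvGet?_last1, htail,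
        pvPairs_append t.tail htlen x y]
    by_cases hxy : x = y
    · simp only [hxy, bne_self_eq_false, Bool.false_eq_true, if_false, beq_self_eq_true,
        Bool.and_true]
      by_cases h1 : t.length = 1
      · rw [if_pos (by simp [h1]), pvPairs_short t.tail (by simp [List.length_tail]; omega)]
      · rw [if_neg (by simp [h1]), pvSliceTake, pvTakeLeft2]
        exact ih t.length (by omega) t (by omega) (by omega) rfl
    · simp [hxy, bne_iff_ne]

theorem pvStrGet?_eq (s : String) (i : Int) :
    PySem.Str.pyGet? s i = PySem.List.pyGet? s.toList i := by
  simp [PySem.Str.pyGet?]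

theorem pvStrLen_eq (s : String) : PySem.Str.len s = (s.toList.length : Int) := by
  simp [PySem.Str.len]

theorem pvLoopB_eq (s : String) (i : Nat) :
    pvLoopB s (i : Int) = pvPairs (s.toList.drop i) := by
  generalize hm : s.toList.length - i = m
  induction m using Nat.strong_induction_on generalizing i with
  | _ m ih =>
    rw [pvLoopB]
    by_cases hcond : (i : Int) < PySem.Str.len s - 1
    · rw [if_pos hcond]
      rw [pvStrLen_eq] at hcond
      have h1 : i + 1 < s.toList.length := by omega
      have h0 : i < s.toList.length := by omega
      have hget0 : PySem.Str.pyGet? s (i : Int) = some s.toList[i] := by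
        rw [pvStrGet?_eq]; exact pvGet?_nat _ _ h0
      have hget1 : PySem.Str.pyGet? s ((i : Int) + 1) = some s.toList[i + 1] := by
        rw [pvStrGet?_eq, show ((i : Int) + 1) = ((i + 1 : Nat) : Int) by push_cast; ring]
        exact pvGet?_nat _ _ h1
      have hdrop : s.toList.drop i = s.toList[i] :: s.toList[i + 1] :: s.toList.drop (i + 2) := by
        rw [List.drop_eq_getElem_cons h0, List.drop_eq_getElem_cons h1]
      rw [hdrop]
      simp only [pvPairs, hget0, hget1]
      by_cases heq : s.toList[i] = s.toList[i + 1]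
      · rw [show ((i : Int) + 2) = ((i + 2 : Nat) : Int) by push_cast; ring,
            ih (s.toList.length - (i + 2)) (by omega) (i + 2) rfl]
        simp [heq]
      · simp [heq]
    · rw [if_neg hcond]
      rw [pvStrLen_eq] at hcond
      exact (pvPairs_short _ (by simp only [List.length_drop]; omega)).symm

theorem pvIntMod_nonneg (n : Int) : PySem.Int.mod n 2 = n % 2 := by
  unfold PySem.Int.mod
  rw [Int.fmod_eq_emod]
  simp

theorem pvChain (l : List Char) (h3 : 3 ≤ l.length) :
    (if PySem.List.pyGet? l (-2) != PySem.List.pyGet? l (-1) then false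
     else if (if ((l.length : Int) != 3) = true then false
              else if PySem.List.pyGet? l (-2) == PySem.List.pyGet? l (-1) then true
              else false) then true
     else pvLoopA (PySem.List.slice l (some 0) (some (-2)))) = pvLoopA l := by
  conv_rhs => rw [pvLoopA]
  rw [if_neg (by omega : ¬ l.length < 3)]
  by_cases hne : (PySem.List.pyGet? l (-2) != PySem.List.pyGet? l (-1)) = true
  · simp [hne]
  · have heq : (PySem.List.pyGet? l (-2) == PySem.List.pyGet? l (-1)) = true := by
      simpa using hne
    by_cases hl3 : l.length = 3
    · simp [hne, heq, hl3]
    · have h1 : ((l.length : Int) != 3) = true := by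
        simp only [bne_iff_ne, ne_eq]
        intro hc
        exact hl3 (by exact_mod_cast hc)
      have h2 : (l.length == 3) = false := by simp [hl3]
      simp [hne, h1, h2]

-- ===== VERDICT (by name: the statement is the Claim_ definition above) =====
theorem is_superegg_iterative_spec : Claim_equal_is_superegg_iterative := by
  intro s _
  unfold Spec_is_superegg_iterative is_superegg_iterative is_superegg_iterative_alt
  by_cases hguard : PySem.Str.len s < 3 || PySem.Int.mod (PySem.Str.len s) 2 == 0
  · rw [if_pos hguard, if_pos hguard]
  · rw [if_neg hguard, if_neg hguard]
    rw [pvStrLen_eq] at hguard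
    simp only [Bool.or_eq_true, not_or, beq_iff_eq, decide_eq_true_eq, not_lt] at hguard
    obtain ⟨hge, hmod⟩ := hguard
    have h3 : 3 ≤ s.toList.length := by exact_mod_cast hge
    have hodd : s.toList.length % 2 = 1 := by
      rw [pvIntMod_nonneg] at hmod
      omega
    have hB : pvLoopB s 1 = pvPairs s.toList.tail := by
      have h := pvLoopB_eq s 1
      rwa [List.drop_one] at h
    rw [hB, ← pvLoopA_eq s.toList hodd h3]
    unfold pvIsEgg
    rw [pvStrGet?_eq, pvStrGet?_eq, pvStrLen_eq]
    exact pvChain s.toList h3
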